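-- pv_equiv track=rewrite | github.com/H0mire/FACETpy | src/facet/correction/deep_learning.py | _chunk_ranges
-- ===== SOURCE A (Python) =====
-- def _chunk_ranges(total_samples: int, chunk_size: int, overlap: int) -> list[tuple[int, int]]:
--     if chunk_size >= total_samples:
--         return [(0, total_samples)]
--
--     ranges: list[tuple[int, int]] = []
--     step = chunk_size - overlap
--     start = 0
--     while start < total_samples:
--         stop = min(start + chunk_size, total_samples)
--         ranges.append((start, stop))
--         if stop == total_samples:
--             break
--         start += step
--     return ranges
-- ===== SOURCE B (Python) =====
-- def _chunk_ranges(total_samples: int, chunk_size: int, overlap: int) -> list[tuple[int, int]]: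
--     if chunk_size >= total_samples:
--         return [(0, total_samples)]
--     step = chunk_size - overlap
--     # number of chunks in closed form: the loop breaks one chunk after the first
--     # start with start + chunk_size >= total_samples, and in any case stops once
--     # start >= total_samples.
--     n = min(-(-(total_samples - chunk_size) // step) + 1, -(-total_samples // step))
--     return [(i * step, min(i * step + chunk_size, total_samples)) for i in range(n)]
-- ===== Notes on version B (the rewrite author's own statement) =====
-- stated objective: alternative
-- what changed: Replaces A's stateful while-loop with append-and-break by an up-front closed-form chunk count (ceiling divisions capped by the loop bound) plus a single mapped range comprehension; Pre_ excludes non-positive step (overlap >= chunk_size with chunk_size < total_samples), where A's loop diverges whenever total_samples > 0 and only returns [] for degenerate non-positive total_samples, on which B's ceiling division is undefined or disagrees.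
-- outside the precondition, e.g. on _chunk_ranges(-1, -2, -2): A returns [], B raises ZeroDivisionError; on _chunk_ranges(-1, -2, 1): A returns [], B returns [(0, -2)]
import Mathlib
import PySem

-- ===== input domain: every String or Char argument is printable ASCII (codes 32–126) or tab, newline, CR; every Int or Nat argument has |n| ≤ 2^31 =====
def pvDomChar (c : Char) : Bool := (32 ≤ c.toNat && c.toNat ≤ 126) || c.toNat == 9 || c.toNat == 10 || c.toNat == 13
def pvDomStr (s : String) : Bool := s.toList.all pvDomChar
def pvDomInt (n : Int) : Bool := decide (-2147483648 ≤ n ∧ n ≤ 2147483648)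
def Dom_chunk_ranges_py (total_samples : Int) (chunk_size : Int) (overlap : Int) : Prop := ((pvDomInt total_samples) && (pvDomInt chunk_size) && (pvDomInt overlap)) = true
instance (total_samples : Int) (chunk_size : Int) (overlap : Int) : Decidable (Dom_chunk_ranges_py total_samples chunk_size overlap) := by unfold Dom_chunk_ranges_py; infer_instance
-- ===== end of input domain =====

-- B replaces A's stateful while-loop by an up-front closed-form chunk count plus a mapped range (objective: alternative decomposition, same cost).

-- ===== PORT A =====
-- fuel makes the while-loop total; Pre_ guarantees the fuel is never exhausted
def chunkLoopA (total chunk step : Int) : Nat → Int → List (Int × Int)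
  | 0, _ => []
  | fuel+1, start =>
    if start < total then
      let stop := min (start + chunk) total
      if stop = total then [(start, stop)]
      else (start, stop) :: chunkLoopA total chunk step fuel (start + step)
    else []

def chunk_ranges_py (total_samples : Int) (chunk_size : Int) (overlap : Int) : List (Int × Int) :=
  if chunk_size ≥ total_samples then [(0, total_samples)]
  else chunkLoopA total_samples chunk_size (chunk_size - overlap) (total_samples.toNat + 1) 0

-- ===== PORT B =====
def chunk_ranges_py_alt (total_samples : Int) (chunk_size : Int) (overlap : Int) : List (Int × Int) :=
  if chunk_size ≥ total_samples then [(0, total_samples)]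
  else
    let step := chunk_size - overlap
    let n := min (-(PySem.Int.floordiv (-(total_samples - chunk_size)) step) + 1)
                 (-(PySem.Int.floordiv (-total_samples) step))
    (PySem.List.pyRange 0 n 1).map
      (fun i => (i * step, min (i * step + chunk_size) total_samples))

-- ===== PRECONDITION & SPEC =====
-- Pre_ excludes non-positive step (overlap ≥ chunk_size with chunk_size < total_samples): there A's while-loop diverges whenever total_samples > 0, and only returns [] for degenerate non-positive total_samples, where B's ceiling division is undefined (step = 0) or disagrees.
def Pre_chunk_ranges_py (total_samples : Int) (chunk_size : Int) (overlap : Int) : Prop :=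
  chunk_size ≥ total_samples ∨ overlap < chunk_size
instance (total_samples : Int) (chunk_size : Int) (overlap : Int) : Decidable (Pre_chunk_ranges_py total_samples chunk_size overlap) := by unfold Pre_chunk_ranges_py; infer_instance

def pvWitness_chunk_ranges_py : Int × Int × Int := (10, 4, 2)

def Spec_chunk_ranges_py (total_samples : Int) (chunk_size : Int) (overlap : Int) (out : List (Int × Int)) : Prop := out = chunk_ranges_py_alt total_samples chunk_size overlap
instance (total_samples : Int) (chunk_size : Int) (overlap : Int) (out : List (Int × Int)) : Decidable (Spec_chunk_ranges_py total_samples chunk_size overlap out) := by unfold Spec_chunk_ranges_py; infer_instance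

-- ===== CLAIM (what is proved, stated in full; the proofs are below) =====
def Claim_equal_chunk_ranges_py : Prop := ∀ (total_samples : Int) (chunk_size : Int) (overlap : Int), Dom_chunk_ranges_py total_samples chunk_size overlap → Pre_chunk_ranges_py total_samples chunk_size overlap → Spec_chunk_ranges_py total_samples chunk_size overlap (chunk_ranges_py total_samples chunk_size overlap)

-- ===== LEMMAS AND PROOFS =====

lemma ceil_pos_of_pos (x s : Int) (hs : 0 < s) (hx : 1 ≤ x) :
    1 ≤ -(PySem.Int.floordiv (-x) s) := by
  rw [PySem.Int.floordiv_eq_ediv_of_pos hs]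
  have hd := Int.mul_ediv_add_emod (-x) s
  have hr0 := Int.emod_nonneg (-x) (by omega : s ≠ 0)
  by_contra hq
  have hq' : 0 ≤ (-x) / s := by omega
  have : 0 ≤ s * ((-x) / s) := mul_nonneg (by omega) hq'
  omega

lemma ceil_nonpos_of_nonpos (x s : Int) (hs : 0 < s) (hx : x ≤ 0) :
    -(PySem.Int.floordiv (-x) s) ≤ 0 := by
  rw [PySem.Int.floordiv_eq_ediv_of_pos hs]
  have : 0 ≤ (-x) / s := Int.ediv_nonneg (by omega) (by omega)
  omega

lemma ceil_zero_of_small (x s : Int) (hs : 0 < s) (h1 : -s < x) (h2 : x ≤ 0) :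
    -(PySem.Int.floordiv (-x) s) = 0 := by
  rw [PySem.Int.floordiv_eq_ediv_of_pos hs]
  have : (-x) / s = 0 := Int.ediv_eq_zero_of_lt (by omega) (by omega)
  omega

lemma ceil_sub_step (x s : Int) (hs : 0 < s) :
    -(PySem.Int.floordiv (-(x - s)) s) = -(PySem.Int.floordiv (-x) s) - 1 := by
  rw [PySem.Int.floordiv_eq_ediv_of_pos hs, PySem.Int.floordiv_eq_ediv_of_pos hs]
  have h : (-x + 1 * s) / s = (-x) / s + 1 := Int.add_mul_ediv_right (-x) 1 (by omega)
  have hx : -(x - s) = -x + 1 * s := by ring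
  rw [hx, h]
  omega

lemma loop_eq (T C s : Int) (hs : 1 ≤ s) :
    ∀ (fuel : Nat) (start : Int), -s < T - C - start → T - start ≤ (fuel : Int) →
    chunkLoopA T C s fuel start =
      (PySem.List.pyRange 0
          (min (-(PySem.Int.floordiv (-(T - C - start)) s) + 1)
               (-(PySem.Int.floordiv (-(T - start)) s))) 1).map
        (fun i => (start + i * s, min (start + i * s + C) T)) := by
  intro fuel
  induction fuel with
  | zero =>
    intro start hinv hfuel
    have h2 := ceil_nonpos_of_nonpos (T - start) s (by omega) (by exact_mod_cast hfuel)
    rw [PySem.List.pyRange_one_eq_nil (by omega)]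
    simp [chunkLoopA]
  | succ fuel ih =>
    intro start hinv hfuel
    by_cases hlt : start < T
    · by_cases hb : T ≤ start + C
      · -- break: stop = T, exactly one chunk left
        have h1 := ceil_zero_of_small (T - C - start) s (by omega) (by omega) (by omega)
        have h2 := ceil_pos_of_pos (T - start) s (by omega) (by omega)
        have hmin : min (-(PySem.Int.floordiv (-(T - C - start)) s) + 1)
            (-(PySem.Int.floordiv (-(T - start)) s)) = 1 := by omega
        have hstop : min (start + C) T = T := by omega
        rw [hmin, PySem.List.pyRange_one_cons (by omega), PySem.List.pyRange_one_eq_nil (by omega)]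
        simp only [chunkLoopA, if_pos hlt, List.map_cons, List.map_nil]
        rw [hstop, if_pos rfl]
        have h0 : start + 0 * s = start := by ring
        rw [h0, hstop]
      · -- continue: stop = start + C < T, recurse
        have hb' : start + C < T := by omega
        have hstop : min (start + C) T = start + C := by omega
        have hc1 := ceil_pos_of_pos (T - C - start) s (by omega) (by omega)
        have hc2 := ceil_pos_of_pos (T - start) s (by omega) (by omega)
        have e1 : -(PySem.Int.floordiv (-(T - C - (start + s))) s)
            = -(PySem.Int.floordiv (-(T - C - start)) s) - 1 := by
          have := ceil_sub_step (T - C - start) s (by omega)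
          have hx : T - C - (start + s) = T - C - start - s := by ring
          rw [hx]; exact this
        have e2 : -(PySem.Int.floordiv (-(T - (start + s))) s)
            = -(PySem.Int.floordiv (-(T - start)) s) - 1 := by
          have := ceil_sub_step (T - start) s (by omega)
          have hx : T - (start + s) = T - start - s := by ring
          rw [hx]; exact this
        have hrec := ih (start + s) (by omega) (by push_cast at hfuel; omega)
        have hnn : min (-(PySem.Int.floordiv (-(T - C - start)) s) + 1)
            (-(PySem.Int.floordiv (-(T - start)) s))
            = min (-(PySem.Int.floordiv (-(T - C - (start + s))) s) + 1)
                (-(PySem.Int.floordiv (-(T - (start + s))) s)) + 1 := by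
          rw [e1, e2]; omega
        set n' := min (-(PySem.Int.floordiv (-(T - C - (start + s))) s) + 1)
            (-(PySem.Int.floordiv (-(T - (start + s))) s)) with hn'
        rw [hnn, PySem.List.pyRange_one_cons (by
          have h0n : 0 ≤ n' := by rw [hn', e1, e2]; omega
          omega)]
        simp only [chunkLoopA, if_pos hlt]
        rw [hstop, if_neg (by omega), hrec]
        simp only [List.map_cons]
        congr 1
        · have h0 : start + 0 * s = start := by ring
          rw [h0, min_eq_left (by omega)]
        · have h01 : (0 : Int) + 1 = 1 := by norm_num
          rw [h01, PySem.List.pyRange_one 1 (n' + 1), PySem.List.pyRange_one 0 n']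
          have hlen : (n' + 1 - 1).toNat = (n' - 0).toNat := by omega
          rw [hlen]
          simp only [List.map_map]
          apply List.map_congr_left
          intro k _
          simp only [Function.comp_apply]
          have h1 : start + (1 + (k : Int)) * s = start + s + (0 + (k : Int)) * s := by ring
          rw [h1]
    · have h2 := ceil_nonpos_of_nonpos (T - start) s (by omega) (by omega)
      rw [PySem.List.pyRange_one_eq_nil (by omega)]
      cases fuel <;> simp [chunkLoopA, hlt]

-- ===== VERDICT (by name: the statement is the Claim_ definition above) =====
theorem chunk_ranges_py_spec : Claim_equal_chunk_ranges_py := by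
  intro T C O _ hpre
  unfold Spec_chunk_ranges_py chunk_ranges_py chunk_ranges_py_alt
  by_cases hge : C ≥ T
  · rw [if_pos hge, if_pos hge]
  · rw [if_neg hge, if_neg hge]
    have hs : 1 ≤ C - O := by
      rcases hpre with h | h
      · omega
      · omega
    have hloop := loop_eq T C (C - O) hs (T.toNat + 1) 0 (by omega) (by push_cast; omega)
    rw [hloop]
    have hx1 : T - C - 0 = T - C := by ring
    have hx2 : T - 0 = T := by ring
    rw [hx1, hx2]
    apply List.map_congr_left
    intro i _
    have h0 : (0 : Int) + i * (C - O) = i * (C - O) := by ring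
    rw [h0]
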